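-- pv_equiv track=rewrite | github.com/masaki-sakata/EntityTree | scripts/eval_tree.py | _cluster_info
-- ===== SOURCE A (Python) =====
-- from typing import Dict, Set, List, Tuple, Optional, Union
--
-- def _popcount(x: int) -> int:
--     try:
--         return x.bit_count()  # Python 3.8+
--     except AttributeError:
--         return bin(x).count("1")
--
-- def _leafsets_bits(adjacency: Dict[int, List[int]], n_leaves: int) -> Dict[int, int]:
--     """各ノード配下の葉集合をintビット集合で返す（正しいポストオーダー集計）。"""
--     # すべてのノードを収集
--     nodes = set(adjacency.keys()) | {c for cs in adjacency.values() for c in cs} | set(range(n_leaves))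
--     children = adjacency
--
--     # トポロジカル順（根→葉）
--     order = []
--     indeg = {u: 0 for u in nodes}
--     for p, cs in children.items():
--         for c in cs:
--             indeg[c] = indeg.get(c, 0) + 1
--     from collections import deque
--     q = deque([u for u in nodes if indeg.get(u, 0) == 0])
--     while q:
--         u = q.popleft()
--         order.append(u)
--         for v in children.get(u, []):
--             indeg[v] -= 1
--             if indeg[v] == 0:
--                 q.append(v)
--
--     # 逆順（葉→根）で集計
--     bits: Dict[int, int] = {}
--     for u in reversed(order):
--         if u < n_leaves:
--             bits[u] = 1 << u
--         else:
--             b = 0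
--             for v in children.get(u, []):
--                 b |= bits.get(v, 0)
--             bits[u] = b
--     return bits
--
-- def _cluster_info(adjacency: Dict[int, List[int]], n_leaves: int):
--     """
--     各内部ノード v について
--       - bits_v: 配下葉のビット集合
--       - child_bits: 各子の葉ビット集合
--       - sz_v, sum_child_sq: |L(v)| と Σ |L(child)|^2
--     """
--     bits = _leafsets_bits(adjacency, n_leaves)
--     info = []
--     for v, cs in adjacency.items():
--         if not cs:
--             continue
--         bv = bits[v]
--         sz = _popcount(bv)
--         if sz < 2:
--             continue
--         child_bits = [bits[c] for c in cs]
--         sum_sq = sum((_popcount(b)) ** 2 for b in child_bits)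
--         info.append((v, bv, sz, child_bits, sum_sq))
--     return info  # list of tuples
-- ===== SOURCE B (Python) =====
-- def _cluster_info(adjacency, n_leaves):
--     # Memoized recursive leaf-bitset computation: no node-universe set, no
--     # indegree bookkeeping, no Kahn queue, no explicit topological order.
--     memo = {}
--
--     def bits(u):
--         if u < n_leaves:
--             return 1 << u
--         if u in memo:
--             return memo[u]
--         b = 0
--         for c in adjacency.get(u, []):
--             b |= bits(c)
--         memo[u] = b
--         return b
--
--     info = []
--     for v, cs in adjacency.items():
--         if not cs:
--             continue
--         bv = bits(v)
--         sz = bv.bit_count()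
--         if sz < 2:
--             continue
--         child_bits = [bits(c) for c in cs]
--         info.append((v, bv, sz, child_bits,
--                      sum(b.bit_count() ** 2 for b in child_bits)))
--     return info
-- ===== Notes on version B (the rewrite author's own statement) =====
-- stated objective: simpler
-- what changed: Replaces the node-universe set, indegree dict, Kahn BFS queue and reverse topological pass with a memoized recursive bits(u) function (1 << u for a leaf, else the OR of bits over adjacency.get(u, []), cached in a dict), computed lazily from the info loop; Pre_ excludes exactly the inputs on which A raises: cyclic adjacency (KeyError from bits[v]) and negative node ids below n_leaves (ValueError from 1 << id).
import Mathlib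
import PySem

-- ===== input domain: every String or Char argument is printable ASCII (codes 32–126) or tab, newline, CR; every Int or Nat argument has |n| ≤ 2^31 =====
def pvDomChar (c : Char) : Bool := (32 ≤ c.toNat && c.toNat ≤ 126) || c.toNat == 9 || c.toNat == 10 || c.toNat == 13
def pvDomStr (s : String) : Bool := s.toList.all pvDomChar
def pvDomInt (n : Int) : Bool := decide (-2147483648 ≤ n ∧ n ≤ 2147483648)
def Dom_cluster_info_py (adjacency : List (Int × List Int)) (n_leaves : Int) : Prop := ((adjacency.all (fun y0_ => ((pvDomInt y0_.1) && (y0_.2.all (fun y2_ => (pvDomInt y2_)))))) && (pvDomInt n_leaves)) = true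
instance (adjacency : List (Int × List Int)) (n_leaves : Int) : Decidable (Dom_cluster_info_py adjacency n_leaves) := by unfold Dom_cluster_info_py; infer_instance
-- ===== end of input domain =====

-- B replaces A's node-universe set + indegree/Kahn-queue topological sort + reverse pass
-- by a memoized recursive leaf-bitset computation (simpler; same values on Pre_).

-- ===== PORT A =====
-- Python's _popcount always takes the int.bit_count() branch (Python 3.8+): PySem.Int.bitCount.
-- 'while q' ported with fuel |nodes| + total-edge-count: each Python iteration pops one queue
-- element and at most |nodes| + Σ|cs| elements are ever enqueued, so the fuel is never exhausted
-- where the Python loop terminates; the set 'nodes' is iterated in first-insertion order (Python: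
-- hash order) — inside Pre_ the returned value is proved independent of that order.
-- 'bits[v]' (KeyError when v is missing) is ported as getD with default 0 and '1 << u' as
-- 1 <<< u.toNat: Pre_ excludes exactly the inputs (cyclic adjacency / negative leaf ids) where
-- the KeyError / ValueError would fire.
def kstep : PySem.Dict Int Int × List Int → Int → PySem.Dict Int Int × List Int := fun s v =>
  let ind := s.1.insert v (s.1.getD v 0 - 1)
  if ind.getD v 0 == 0 then (ind, s.2 ++ [v]) else (ind, s.2)

def kahnLoop (children : PySem.Dict Int (List Int)) :
    Nat → List Int → PySem.Dict Int Int → List Int → List Int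
  | _, [], _, order => order
  | 0, _ :: _, _, order => order
  | fuel+1, u :: q, indeg, order =>
      let st := (children.getD u []).foldl kstep (indeg, q)
      kahnLoop children fuel st.2 st.1 (order ++ [u])

def bstepA (children : PySem.Dict Int (List Int)) (n_leaves : Int) :
    PySem.Dict Int Int → Int → PySem.Dict Int Int := fun bits u =>
  if u < n_leaves then bits.insert u ((1 : Int) <<< u.toNat)
  else bits.insert u ((children.getD u []).foldl (fun b v => PySem.Int.bor b (bits.getD v 0)) 0)

def leafsetsBits (children : PySem.Dict Int (List Int)) (n_leaves : Int) : PySem.Dict Int Int :=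
  let nodes : PySem.Set Int :=
    PySem.Set.union (PySem.Set.union (PySem.Set.ofList children.keys) children.values.flatten)
      (PySem.List.pyRange 0 n_leaves 1)
  let indeg : PySem.Dict Int Int :=
    children.items.foldl (fun d p => p.2.foldl (fun d c => d.insert c (d.getD c 0 + 1)) d)
      (nodes.foldl (fun d u => d.insert u (0 : Int)) PySem.Dict.empty)
  let q := nodes.filter (fun u => indeg.getD u 0 == 0)
  let order := kahnLoop children (nodes.length + (children.values.map (·.length)).sum) q indeg []
  order.reverse.foldl (bstepA children n_leaves) PySem.Dict.empty

def cluster_info_py (adjacency : List (Int × List Int)) (n_leaves : Int) :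
    List (Int × Int × Int × List Int × Int) :=
  let adj := PySem.Dict.ofList adjacency
  let bits := leafsetsBits adj n_leaves
  adj.items.foldl
    (fun info p =>
      if p.2 = [] then info
      else
        let bv := bits.getD p.1 0
        let sz : Int := PySem.Int.bitCount bv
        if sz < 2 then info
        else
          let cb := p.2.map (fun c => bits.getD c 0)
          info ++ [(p.1, bv, sz, cb, (cb.map (fun b => ((PySem.Int.bitCount b : Int)) ^ 2)).sum)])
    []

-- ===== PORT B =====
-- Source B's memoized recursive bits(u): 1 << u for a leaf, else the memo entry, else the OR of
-- bits(c) over adjacency.get(u,[]) stored into the memo.  The recursion is ported with fuel as a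
-- pure termination device (fuel = total-child-count + 1 bounds the recursion depth on every
-- acyclic input; Python's recursion has no fuel and simply does not return on cyclic inputs,
-- which Pre_ excludes).
def bitsB (adj : PySem.Dict Int (List Int)) (n : Int) :
    Nat → PySem.Dict Int Int → Int → Int × PySem.Dict Int Int
  | 0 => fun memo u =>
      if u < n then ((1 : Int) <<< u.toNat, memo)
      else match memo.get? u with
        | some b => (b, memo)
        | none => (0, memo)
  | f+1 => fun memo u =>
      if u < n then ((1 : Int) <<< u.toNat, memo)
      else match memo.get? u with
        | some b => (b, memo)
        | none =>
            let st := (adj.getD u []).foldl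
              (fun (s : Int × PySem.Dict Int Int) c =>
                let r := bitsB adj n f s.2 c
                (PySem.Int.bor s.1 r.1, r.2)) ((0 : Int), memo)
            (st.1, st.2.insert u st.1)

-- one iteration of Source B's info loop, threading the memo dict through the calls to bits
def altStep (adj : PySem.Dict Int (List Int)) (n : Int) (fuel : Nat)
    (s : List (Int × Int × Int × List Int × Int) × PySem.Dict Int Int) (p : Int × List Int) :
    List (Int × Int × Int × List Int × Int) × PySem.Dict Int Int :=
  if p.2 = [] then s
  else
    let r := bitsB adj n fuel s.2 p.1
    let sz : Int := PySem.Int.bitCount r.1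
    if sz < 2 then (s.1, r.2)
    else
      let cb := p.2.foldl
        (fun (t : List Int × PySem.Dict Int Int) c =>
          let rc := bitsB adj n fuel t.2 c
          (t.1 ++ [rc.1], rc.2)) (([] : List Int), r.2)
      (s.1 ++ [(p.1, r.1, sz, cb.1, (cb.1.map (fun b => ((PySem.Int.bitCount b : Int)) ^ 2)).sum)],
        cb.2)

def cluster_info_py_alt (adjacency : List (Int × List Int)) (n_leaves : Int) :
    List (Int × Int × Int × List Int × Int) :=
  let adj := PySem.Dict.ofList adjacency
  let fuel := adj.values.flatten.length + 1
  (adj.items.foldl (altStep adj n_leaves fuel) ([], PySem.Dict.empty)).1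

-- ===== PRECONDITION & SPEC =====
-- graph helpers for Pre_: one step of child-reachability, and the set of nodes reachable from
-- u's children (iterated to saturation; neither port computes reachability)
def cstep (d : PySem.Dict Int (List Int)) (s : Finset Int) : Finset Int :=
  s ∪ s.biUnion (fun u => (d.getD u []).toFinset)

def rchF (d : PySem.Dict Int (List Int)) (u : Int) : Finset Int :=
  (cstep d)^[d.values.flatten.length + 1] (d.getD u []).toFinset

-- Pre_ excludes exactly the inputs on which A raises: a cyclic adjacency (a key reachable from
-- its own children; the Kahn order then misses it and bits[v] raises KeyError), and a node id
-- that is negative yet below n_leaves (1 << id raises ValueError).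
def Pre_cluster_info_py (adjacency : List (Int × List Int)) (n_leaves : Int) : Prop :=
  (∀ p ∈ (PySem.Dict.ofList adjacency).items, p.1 ∉ rchF (PySem.Dict.ofList adjacency) p.1) ∧
  (∀ p ∈ (PySem.Dict.ofList adjacency).items,
    (p.1 < n_leaves → 0 ≤ p.1) ∧ ∀ c ∈ p.2, c < n_leaves → 0 ≤ c)
instance (adjacency : List (Int × List Int)) (n_leaves : Int) :
    Decidable (Pre_cluster_info_py adjacency n_leaves) := by unfold Pre_cluster_info_py; infer_instance

def pvWitness_cluster_info_py : (List (Int × List Int)) × Int := ([(2, [0, 1])], 2)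

def Spec_cluster_info_py (adjacency : List (Int × List Int)) (n_leaves : Int)
    (out : List (Int × Int × Int × List Int × Int)) : Prop :=
  out = cluster_info_py_alt adjacency n_leaves
instance (adjacency : List (Int × List Int)) (n_leaves : Int)
    (out : List (Int × Int × Int × List Int × Int)) :
    Decidable (Spec_cluster_info_py adjacency n_leaves out) := by
  unfold Spec_cluster_info_py; infer_instance

-- ===== CLAIM (what is proved, stated in full; the proofs are below) =====
def Claim_equal_cluster_info_py : Prop :=
  ∀ (adjacency : List (Int × List Int)) (n_leaves : Int),
    Dom_cluster_info_py adjacency n_leaves → Pre_cluster_info_py adjacency n_leaves →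
    Spec_cluster_info_py adjacency n_leaves (cluster_info_py adjacency n_leaves)

-- ===== LEMMAS AND PROOFS =====

-- ---------- closure / rank machinery ----------
theorem cstep_infl (d : PySem.Dict Int (List Int)) (s : Finset Int) : s ⊆ cstep d s :=
  Finset.subset_union_left

theorem getD_sub_flatten (d : PySem.Dict Int (List Int)) (u : Int) :
    ∀ x ∈ d.getD u [], x ∈ d.values.flatten := by
  intro x hx
  cases hg : d.get? u with
  | none => rw [PySem.Dict.getD_eq_get?_getD, hg] at hx; simp at hx
  | some cs =>
      rw [PySem.Dict.getD_eq_get?_getD, hg] at hx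
      have hitem := PySem.Dict.mem_items_of_get?_eq_some d hg
      exact List.mem_flatten.mpr ⟨cs, List.mem_map_of_mem hitem, hx⟩

theorem cstep_bound (d : PySem.Dict Int (List Int)) {s : Finset Int}
    (h : s ⊆ d.values.flatten.toFinset) : cstep d s ⊆ d.values.flatten.toFinset := by
  unfold cstep
  refine Finset.union_subset h (Finset.biUnion_subset.mpr ?_)
  intro u _
  intro x hx
  exact List.mem_toFinset.mpr (getD_sub_flatten d u x (List.mem_toFinset.mp hx))

theorem iter_bound (d : PySem.Dict Int (List Int)) (u : Int) :
    ∀ i, (cstep d)^[i] (d.getD u []).toFinset ⊆ d.values.flatten.toFinset := by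
  intro i
  induction i with
  | zero =>
      intro x hx
      exact List.mem_toFinset.mpr (getD_sub_flatten d u x (List.mem_toFinset.mp hx))
  | succ i ih =>
      rw [Function.iterate_succ_apply' (cstep d) i ((d.getD u []).toFinset)]
      exact cstep_bound d ih

theorem iter_infl (f : Finset Int → Finset Int) (hinfl : ∀ s, s ⊆ f s) (s : Finset Int) :
    ∀ i, s ⊆ f^[i] s := by
  intro i
  induction i with
  | zero => exact subset_rfl
  | succ i ih =>
      rw [Function.iterate_succ_apply' f i s]
      exact ih.trans (hinfl _)

theorem iter_card_grow (f : Finset Int → Finset Int) (hinfl : ∀ s, s ⊆ f s) (s : Finset Int) :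
    ∀ m, (∀ i < m, f^[i+1] s ≠ f^[i] s) → m ≤ (f^[m] s).card := by
  intro m
  induction m with
  | zero => intro _; exact Nat.zero_le _
  | succ m ih =>
      intro h
      have hm := ih (fun i hi => h i (Nat.lt_succ_of_lt hi))
      have hne : f^[m+1] s ≠ f^[m] s := h m (Nat.lt_succ_self m)
      have hsub : f^[m] s ⊆ f^[m+1] s := by
        rw [Function.iterate_succ_apply' f m s]
        exact hinfl _
      have : (f^[m] s).card < (f^[m+1] s).card :=
        Finset.card_lt_card (Finset.ssubset_iff_subset_ne.mpr ⟨hsub, fun he => hne he.symm⟩)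
      omega

theorem fix_persists (f : Finset Int → Finset Int) (s : Finset Int) (i : Nat)
    (hfix : f^[i+1] s = f^[i] s) : ∀ j, i ≤ j → f^[j] s = f^[i] s := by
  intro j hj
  induction j, hj using Nat.le_induction with
  | base => rfl
  | succ j hj ih =>
      rw [Function.iterate_succ_apply' f j s, ih, ← Function.iterate_succ_apply' f i s]
      exact hfix

theorem rchF_fix (d : PySem.Dict Int (List Int)) (u : Int) :
    cstep d (rchF d u) = rchF d u := by
  set L := d.values.flatten.length with hL
  set s0 := (d.getD u []).toFinset with hs0
  have hcard : ∀ i, ((cstep d)^[i] s0).card ≤ L := by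
    intro i
    calc ((cstep d)^[i] s0).card ≤ d.values.flatten.toFinset.card :=
          Finset.card_le_card (iter_bound d u i)
      _ ≤ L := d.values.flatten.toFinset_card_le
  have hex : ∃ i ≤ L, (cstep d)^[i+1] s0 = (cstep d)^[i] s0 := by
    by_contra hno
    push_neg at hno
    have := iter_card_grow (cstep d) (cstep_infl d) s0 (L+1)
      (fun i hi => hno i (by omega))
    have := hcard (L+1)
    omega
  obtain ⟨i, hiL, hfix⟩ := hex
  have h1 : (cstep d)^[L+1] s0 = (cstep d)^[i] s0 :=
    fix_persists (cstep d) s0 i hfix (L+1) (by omega)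
  have h2 : (cstep d)^[L+2] s0 = (cstep d)^[i] s0 :=
    fix_persists (cstep d) s0 i hfix (L+2) (by omega)
  show cstep d ((cstep d)^[L+1] s0) = (cstep d)^[L+1] s0
  rw [← Function.iterate_succ_apply' (cstep d) (L+1) s0]
  exact h2.trans h1.symm

theorem subset_rchF (d : PySem.Dict Int (List Int)) (u : Int) :
    (d.getD u []).toFinset ⊆ rchF d u :=
  iter_infl (cstep d) (cstep_infl d) _ _

theorem rchF_closed (d : PySem.Dict Int (List Int)) (u : Int) {x : Int} (hx : x ∈ rchF d u) :
    (d.getD x []).toFinset ⊆ rchF d u := by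
  intro y hy
  rw [← rchF_fix d u]
  exact Finset.mem_union_right _ (Finset.mem_biUnion.mpr ⟨x, hx, hy⟩)

theorem rchF_min (d : PySem.Dict Int (List Int)) (u : Int) {M : Finset Int}
    (h0 : (d.getD u []).toFinset ⊆ M) (hM : ∀ x ∈ M, (d.getD x []).toFinset ⊆ M) :
    rchF d u ⊆ M := by
  show (cstep d)^[d.values.flatten.length + 1] (d.getD u []).toFinset ⊆ M
  generalize d.values.flatten.length + 1 = k
  induction k with
  | zero => exact h0
  | succ k ih =>
      rw [Function.iterate_succ_apply' (cstep d) k ((d.getD u []).toFinset)]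
      exact Finset.union_subset ih (Finset.biUnion_subset.mpr (fun x hx => hM x (ih hx)))

theorem rchF_child_sub (d : PySem.Dict Int (List Int)) {u c : Int} (hc : c ∈ d.getD u []) :
    rchF d c ⊆ rchF d u := by
  have hcmem : c ∈ rchF d u := subset_rchF d u (List.mem_toFinset.mpr hc)
  exact rchF_min d c (rchF_closed d u hcmem) (fun x hx => rchF_closed d u hx)

def rkF (d : PySem.Dict Int (List Int)) (u : Int) : Nat := (rchF d u).card

theorem rk_le (d : PySem.Dict Int (List Int)) (u : Int) :
    rkF d u ≤ d.values.flatten.length := by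
  unfold rkF rchF
  calc ((cstep d)^[d.values.flatten.length + 1] (d.getD u []).toFinset).card
      ≤ d.values.flatten.toFinset.card := Finset.card_le_card (iter_bound d u _)
    _ ≤ d.values.flatten.length := d.values.flatten.toFinset_card_le

theorem rk_lt (d : PySem.Dict Int (List Int))
    (hacy : ∀ p ∈ d.items, p.1 ∉ rchF d p.1) {u c : Int}
    (hc : c ∈ d.getD u []) (hck : c ∈ d.keys) : rkF d c < rkF d u := by
  have hsub := rchF_child_sub d hc
  have hcmem : c ∈ rchF d u := subset_rchF d u (List.mem_toFinset.mpr hc)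
  have hcnot : c ∉ rchF d c := by
    cases hg : d.get? c with
    | none =>
        rw [PySem.Dict.get?_eq_none_iff_not_mem_keys] at hg
        exact absurd hck hg
    | some cs => exact hacy (c, cs) (PySem.Dict.mem_items_of_get?_eq_some d hg)
  refine Finset.card_lt_card (Finset.ssubset_iff_subset_ne.mpr ⟨hsub, ?_⟩)
  intro he
  exact hcnot (he ▸ hcmem)

theorem getD_nonkey (d : PySem.Dict Int (List Int)) {u : Int} (h : u ∉ d.keys) :
    d.getD u [] = [] := by
  have hg : d.get? u = none := by
    rw [PySem.Dict.get?_eq_none_iff_not_mem_keys]; exact h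
  rw [PySem.Dict.getD_eq_get?_getD, hg]; rfl

theorem children_nil_of_rk_zero (d : PySem.Dict Int (List Int)) {u : Int}
    (h : rkF d u = 0) : d.getD u [] = [] := by
  have h2 : rchF d u = ∅ := Finset.card_eq_zero.mp h
  rcases hl : d.getD u [] with _ | ⟨a, t⟩
  · rfl
  · exfalso
    have : a ∈ rchF d u := subset_rchF d u (List.mem_toFinset.mpr (by rw [hl]; exact List.mem_cons_self))
    rw [h2] at this
    simp at this

-- ---------- B-side value function ----------
def pbB (adj : PySem.Dict Int (List Int)) (n : Int) : Nat → Int → Int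
  | 0 => fun u => if u < n then (1 : Int) <<< u.toNat else 0
  | f+1 => fun u =>
      if u < n then (1 : Int) <<< u.toNat
      else (adj.getD u []).foldl (fun b c => PySem.Int.bor b (pbB adj n f c)) 0

def valB (adj : PySem.Dict Int (List Int)) (n : Int) (u : Int) : Int :=
  pbB adj n (rkF adj u + 1) u

theorem pbB_leaf (adj : PySem.Dict Int (List Int)) (n : Int) (f : Nat) (u : Int) (h : u < n) :
    pbB adj n f u = (1 : Int) <<< u.toNat := by
  cases f <;> simp [pbB, h]

theorem pbB_nonkey (adj : PySem.Dict Int (List Int)) (n : Int) (f : Nat) (u : Int)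
    (hn : ¬ u < n) (hk : u ∉ adj.keys) : pbB adj n f u = 0 := by
  cases f with
  | zero => simp [pbB, hn]
  | succ f => simp [pbB, hn, getD_nonkey adj hk]

theorem valB_leaf (adj : PySem.Dict Int (List Int)) (n : Int) (u : Int) (h : u < n) :
    valB adj n u = (1 : Int) <<< u.toNat := pbB_leaf adj n _ u h

theorem pbB_stable (adj : PySem.Dict Int (List Int)) (n : Int)
    (hacy : ∀ p ∈ adj.items, p.1 ∉ rchF adj p.1) :
    ∀ (R : Nat) (u : Int), rkF adj u ≤ R →
      ∀ f g, rkF adj u < f → rkF adj u < g → pbB adj n f u = pbB adj n g u := by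
  intro R
  induction R with
  | zero =>
      intro u hR f g hf hg
      by_cases hn : u < n
      · rw [pbB_leaf adj n f u hn, pbB_leaf adj n g u hn]
      have hnil := children_nil_of_rk_zero adj (Nat.le_zero.mp hR)
      rcases f with _ | f'
      · omega
      rcases g with _ | g'
      · omega
      simp [pbB, hn, hnil]
  | succ R ih =>
      intro u hR f g hf hg
      by_cases hn : u < n
      · rw [pbB_leaf adj n f u hn, pbB_leaf adj n g u hn]
      rcases f with _ | f'
      · omega
      rcases g with _ | g'
      · omega
      simp only [pbB, if_neg hn]
      apply PySem.List.foldl_congr_mem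
      intro acc c hc
      congr 1
      by_cases hcn : c < n
      · rw [pbB_leaf adj n f' c hcn, pbB_leaf adj n g' c hcn]
      by_cases hck : c ∈ adj.keys
      · have hlt : rkF adj c < rkF adj u := rk_lt adj hacy hc hck
        exact ih c (by omega) f' g' (by omega) (by omega)
      · rw [pbB_nonkey adj n f' c hcn hck, pbB_nonkey adj n g' c hcn hck]

theorem valB_fix (adj : PySem.Dict Int (List Int)) (n : Int)
    (hacy : ∀ p ∈ adj.items, p.1 ∉ rchF adj p.1) (u : Int) (hn : ¬ u < n) :
    valB adj n u = (adj.getD u []).foldl (fun b c => PySem.Int.bor b (valB adj n c)) 0 := by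
  show pbB adj n (rkF adj u + 1) u = _
  simp only [pbB, if_neg hn]
  apply PySem.List.foldl_congr_mem
  intro acc c hc
  congr 1
  by_cases hcn : c < n
  · rw [pbB_leaf adj n _ c hcn, valB_leaf adj n c hcn]
  by_cases hck : c ∈ adj.keys
  · have hlt : rkF adj c < rkF adj u := rk_lt adj hacy hc hck
    exact pbB_stable adj n hacy (rkF adj c) c le_rfl _ _ hlt (Nat.lt_succ_self _)
  · rw [pbB_nonkey adj n _ c hcn hck]
    show (0 : Int) = valB adj n c
    rw [valB, pbB_nonkey adj n _ c hcn hck]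

-- ---------- B-side memoization correctness ----------
def GoodM (adj : PySem.Dict Int (List Int)) (n : Int) (memo : PySem.Dict Int Int) : Prop :=
  ∀ k b, memo.get? k = some b → b = valB adj n k

theorem GoodM_empty (adj : PySem.Dict Int (List Int)) (n : Int) :
    GoodM adj n PySem.Dict.empty := by
  intro k b h
  simp [PySem.Dict.get?_empty] at h

theorem GoodM_insert (adj : PySem.Dict Int (List Int)) (n : Int) {memo : PySem.Dict Int Int}
    {u v : Int} (h : GoodM adj n memo) (hv : v = valB adj n u) :
    GoodM adj n (memo.insert u v) := by
  intro k b hk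
  rw [PySem.Dict.get?_insert] at hk
  by_cases hku : k = u
  · rw [if_pos hku] at hk
    injection hk with h2
    rw [← h2, hku]
    exact hv
  · rw [if_neg hku] at hk
    exact h k b hk

theorem bitsB_leaf (adj : PySem.Dict Int (List Int)) (n : Int) (f : Nat)
    (memo : PySem.Dict Int Int) (u : Int) (h : u < n) :
    bitsB adj n f memo u = ((1 : Int) <<< u.toNat, memo) := by
  cases f <;> simp [bitsB, h]

theorem bitsB_nonkey (adj : PySem.Dict Int (List Int)) (n : Int)
    (f : Nat) (memo : PySem.Dict Int Int) (u : Int)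
    (hn : ¬ u < n) (hk : u ∉ adj.keys) (hG : GoodM adj n memo) :
    (bitsB adj n f memo u).1 = valB adj n u ∧ GoodM adj n (bitsB adj n f memo u).2 := by
  have hv : valB adj n u = 0 := by rw [valB, pbB_nonkey adj n _ u hn hk]
  cases f with
  | zero =>
      simp only [bitsB, if_neg hn]
      cases hm : memo.get? u with
      | some b => exact ⟨hG u b hm, hG⟩
      | none => exact ⟨hv.symm, hG⟩
  | succ f' =>
      simp only [bitsB, if_neg hn]
      cases hm : memo.get? u with
      | some b => exact ⟨hG u b hm, hG⟩
      | none =>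
          simp only [getD_nonkey adj hk, List.foldl_nil]
          exact ⟨hv.symm, GoodM_insert adj n hG hv.symm⟩

theorem bits_fold (adj : PySem.Dict Int (List Int)) (n : Int) (f' : Nat) :
    ∀ (cs : List Int),
    (∀ c ∈ cs, ∀ m, GoodM adj n m →
      (bitsB adj n f' m c).1 = valB adj n c ∧ GoodM adj n (bitsB adj n f' m c).2) →
    ∀ (acc : Int) (m : PySem.Dict Int Int), GoodM adj n m →
    (cs.foldl (fun (s : Int × PySem.Dict Int Int) c =>
        let r := bitsB adj n f' s.2 c
        (PySem.Int.bor s.1 r.1, r.2)) (acc, m)).1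
      = cs.foldl (fun b c => PySem.Int.bor b (valB adj n c)) acc
    ∧ GoodM adj n ((cs.foldl (fun (s : Int × PySem.Dict Int Int) c =>
        let r := bitsB adj n f' s.2 c
        (PySem.Int.bor s.1 r.1, r.2)) (acc, m)).2) := by
  intro cs
  induction cs with
  | nil => intro _ acc m hGm; exact ⟨rfl, hGm⟩
  | cons c t iht =>
      intro hcs acc m hGm
      obtain ⟨h1, h2⟩ := hcs c List.mem_cons_self m hGm
      simp only [List.foldl_cons, h1]
      exact iht (fun c hc => hcs c (List.mem_cons_of_mem _ hc)) _ _ h2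

theorem bitsB_spec (adj : PySem.Dict Int (List Int)) (n : Int)
    (hacy : ∀ p ∈ adj.items, p.1 ∉ rchF adj p.1) :
    ∀ (R : Nat) (u : Int), rkF adj u ≤ R →
      ∀ (f : Nat) (memo : PySem.Dict Int Int), rkF adj u < f → GoodM adj n memo →
      (bitsB adj n f memo u).1 = valB adj n u ∧ GoodM adj n (bitsB adj n f memo u).2 := by
  intro R
  induction R with
  | zero =>
      intro u hR f memo hf hG
      by_cases hn : u < n
      · rw [bitsB_leaf adj n f memo u hn]
        exact ⟨(valB_leaf adj n u hn).symm, hG⟩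
      rcases f with _ | f'
      · omega
      have hnil : adj.getD u [] = [] := children_nil_of_rk_zero adj (Nat.le_zero.mp hR)
      have hv : valB adj n u = 0 := by rw [valB_fix adj n hacy u hn, hnil]; rfl
      simp only [bitsB, if_neg hn]
      cases hm : memo.get? u with
      | some b => exact ⟨hG u b hm, hG⟩
      | none =>
          simp only [hnil, List.foldl_nil]
          exact ⟨hv.symm, GoodM_insert adj n hG hv.symm⟩
  | succ R ih =>
      intro u hR f memo hf hG
      by_cases hn : u < n
      · rw [bitsB_leaf adj n f memo u hn]
        exact ⟨(valB_leaf adj n u hn).symm, hG⟩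
      rcases f with _ | f'
      · omega
      simp only [bitsB, if_neg hn]
      cases hm : memo.get? u with
      | some b => exact ⟨hG u b hm, hG⟩
      | none =>
          have hchild : ∀ c ∈ adj.getD u [], ∀ m, GoodM adj n m →
              (bitsB adj n f' m c).1 = valB adj n c ∧ GoodM adj n (bitsB adj n f' m c).2 := by
            intro c hc m hGm
            by_cases hcn : c < n
            · rw [bitsB_leaf adj n f' m c hcn]
              exact ⟨(valB_leaf adj n c hcn).symm, hGm⟩
            by_cases hck : c ∈ adj.keys
            · have hlt := rk_lt adj hacy hc hck
              exact ih c (by omega) f' m (by omega) hGm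
            · exact bitsB_nonkey adj n f' m c hcn hck hGm
          obtain ⟨h1, h2⟩ := bits_fold adj n f' (adj.getD u []) hchild 0 memo hG
          refine ⟨?_, GoodM_insert adj n h2 ?_⟩
          · show ((adj.getD u []).foldl _ ((0 : Int), memo)).1 = valB adj n u
            rw [h1, ← valB_fix adj n hacy u hn]
          · rw [h1, ← valB_fix adj n hacy u hn]

theorem bitsB_top (adj : PySem.Dict Int (List Int)) (n : Int)
    (hacy : ∀ p ∈ adj.items, p.1 ∉ rchF adj p.1) (u : Int) (memo : PySem.Dict Int Int)
    (hG : GoodM adj n memo) :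
    (bitsB adj n (adj.values.flatten.length + 1) memo u).1 = valB adj n u ∧
      GoodM adj n (bitsB adj n (adj.values.flatten.length + 1) memo u).2 :=
  bitsB_spec adj n hacy (rkF adj u) u le_rfl _ memo (Nat.lt_succ_of_le (rk_le adj u)) hG

-- the pure (memo-free) version of one iteration of Source B's info loop
def stepPure (adj : PySem.Dict Int (List Int)) (n : Int)
    (info : List (Int × Int × Int × List Int × Int)) (p : Int × List Int) :
    List (Int × Int × Int × List Int × Int) :=
  if p.2 = [] then info
  else
    let bv := valB adj n p.1
    let sz : Int := PySem.Int.bitCount bv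
    if sz < 2 then info
    else
      let cb := p.2.map (valB adj n)
      info ++ [(p.1, bv, sz, cb, (cb.map (fun b => ((PySem.Int.bitCount b : Int)) ^ 2)).sum)]

theorem cb_fold (adj : PySem.Dict Int (List Int)) (n : Int)
    (hacy : ∀ p ∈ adj.items, p.1 ∉ rchF adj p.1) :
    ∀ (cs : List Int) (acc : List Int) (m : PySem.Dict Int Int), GoodM adj n m →
    (cs.foldl (fun (t : List Int × PySem.Dict Int Int) c =>
        let rc := bitsB adj n (adj.values.flatten.length + 1) t.2 c
        (t.1 ++ [rc.1], rc.2)) (acc, m)).1 = acc ++ cs.map (valB adj n)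
    ∧ GoodM adj n ((cs.foldl (fun (t : List Int × PySem.Dict Int Int) c =>
        let rc := bitsB adj n (adj.values.flatten.length + 1) t.2 c
        (t.1 ++ [rc.1], rc.2)) (acc, m)).2) := by
  intro cs
  induction cs with
  | nil => intro acc m hGm; exact ⟨by simp, hGm⟩
  | cons c t iht =>
      intro acc m hGm
      obtain ⟨h1, h2⟩ := bitsB_top adj n hacy c m hGm
      simp only [List.foldl_cons, h1]
      obtain ⟨h3, h4⟩ := iht (acc ++ [valB adj n c]) _ h2
      refine ⟨?_, h4⟩
      rw [h3]
      simp

theorem alt_fold (adj : PySem.Dict Int (List Int)) (n : Int)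
    (hacy : ∀ p ∈ adj.items, p.1 ∉ rchF adj p.1) :
    ∀ (l : List (Int × List Int)) (acc : List (Int × Int × Int × List Int × Int))
      (memo : PySem.Dict Int Int), GoodM adj n memo →
    (l.foldl (altStep adj n (adj.values.flatten.length + 1)) (acc, memo)).1
      = l.foldl (stepPure adj n) acc := by
  intro l
  induction l with
  | nil => intro acc memo _; rfl
  | cons p t iht =>
      intro acc memo hG
      simp only [List.foldl_cons]
      by_cases hpnil : p.2 = []
      · rw [show altStep adj n (adj.values.flatten.length + 1) (acc, memo) p = (acc, memo) by
          simp [altStep, hpnil]]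
        rw [show stepPure adj n acc p = acc by simp [stepPure, hpnil]]
        exact iht acc memo hG
      · obtain ⟨h1, h2⟩ := bitsB_top adj n hacy p.1 memo hG
        by_cases hsz : ((PySem.Int.bitCount (valB adj n p.1) : Int)) < 2
        · rw [show altStep adj n (adj.values.flatten.length + 1) (acc, memo) p
              = (acc, (bitsB adj n (adj.values.flatten.length + 1) memo p.1).2) by
            simp only [altStep, if_neg hpnil, h1]
            rw [if_pos hsz]]
          rw [show stepPure adj n acc p = acc by
            simp only [stepPure, if_neg hpnil]
            rw [if_pos hsz]]
          exact iht acc _ h2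
        · obtain ⟨h3, h4⟩ := cb_fold adj n hacy p.2 []
            (bitsB adj n (adj.values.flatten.length + 1) memo p.1).2 h2
          rw [show altStep adj n (adj.values.flatten.length + 1) (acc, memo) p
              = (acc ++ [(p.1, valB adj n p.1, ((PySem.Int.bitCount (valB adj n p.1) : Int)),
                  p.2.map (valB adj n),
                  ((p.2.map (valB adj n)).map
                    (fun b => ((PySem.Int.bitCount b : Int)) ^ 2)).sum)],
                (p.2.foldl (fun (t : List Int × PySem.Dict Int Int) c =>
                  let rc := bitsB adj n (adj.values.flatten.length + 1) t.2 c
                  (t.1 ++ [rc.1], rc.2)) (([] : List Int),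
                    (bitsB adj n (adj.values.flatten.length + 1) memo p.1).2)).2) by
            simp only [altStep, if_neg hpnil, h1]
            rw [if_neg hsz]
            simp only [h3, List.nil_append]]
          rw [show stepPure adj n acc p
              = acc ++ [(p.1, valB adj n p.1, ((PySem.Int.bitCount (valB adj n p.1) : Int)),
                  p.2.map (valB adj n),
                  ((p.2.map (valB adj n)).map
                    (fun b => ((PySem.Int.bitCount b : Int)) ^ 2)).sum)] by
            simp only [stepPure, if_neg hpnil]
            rw [if_neg hsz]]
          exact iht _ _ h4

-- ---------- A-side Kahn machinery ----------
-- multiplicity of c as a child of a not-yet-popped key: the quantity Kahn's indeg tracks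
def cntP (d : PySem.Dict Int (List Int)) (order : List Int) (c : Int) : Nat :=
  (d.items.map (fun pc => if pc.1 ∈ order then 0 else pc.2.count c)).sum

-- every in-neighbour of an element of o appears strictly earlier in o
def GoodOrder (d : PySem.Dict Int (List Int)) (o : List Int) : Prop :=
  ∀ l1 u l2, o = l1 ++ u :: l2 → ∀ p ∈ d.items, u ∈ p.2 → p.1 ∈ l1

theorem cntP_nil (d : PySem.Dict Int (List Int)) (c : Int) :
    cntP d [] c = (d.items.map (fun pc => pc.2.count c)).sum := by
  unfold cntP; simp

theorem cntP_zero_iff (d : PySem.Dict Int (List Int)) (order : List Int) (c : Int) :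
    cntP d order c = 0 ↔ ∀ p ∈ d.items, p.1 ∉ order → p.2.count c = 0 := by
  unfold cntP
  rw [List.sum_eq_zero_iff]
  constructor
  · intro h p hp hpo
    have := h (if p.1 ∈ order then 0 else p.2.count c) (List.mem_map_of_mem hp)
    simpa [hpo] using this
  · intro h x hx
    obtain ⟨p, hp, rfl⟩ := List.mem_map.mp hx
    by_cases hpo : p.1 ∈ order <;> simp [hpo, h p hp]

theorem cnt_split_list (order : List Int) (u : Int) (cs : List Int) (c : Int) (hu : u ∉ order) :
    ∀ (l : List (Int × List Int)), (l.map Prod.fst).Nodup → (u, cs) ∈ l →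
    (l.map (fun pc => if pc.1 ∈ order then 0 else pc.2.count c)).sum
      = (l.map (fun pc => if pc.1 ∈ order ++ [u] then 0 else pc.2.count c)).sum + cs.count c := by
  intro l
  induction l with
  | nil => intro _ h; simp at h
  | cons p t ih =>
      intro hnd hmem
      rw [List.map_cons, List.nodup_cons] at hnd
      rcases List.mem_cons.mp hmem with rfl | hmem'
      · have htail : ∀ pc ∈ t, (if pc.1 ∈ order then 0 else pc.2.count c)
            = (if pc.1 ∈ order ++ [u] then 0 else pc.2.count c) := by
          intro pc hpc
          have hne : pc.1 ≠ u := by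
            intro he
            exact hnd.1 (List.mem_map.mpr ⟨pc, hpc, he⟩)
          simp [List.mem_append, hne]
        simp only [List.map_cons, List.sum_cons]
        rw [List.map_congr_left htail]
        simp [hu]
        omega
      · have hne : p.1 ≠ u := by
          intro he
          exact hnd.1 (he ▸ List.mem_map.mpr ⟨(u, cs), hmem', rfl⟩)
        simp only [List.map_cons, List.sum_cons, ih hnd.2 hmem']
        have : (if p.1 ∈ order then 0 else p.2.count c)
            = (if p.1 ∈ order ++ [u] then 0 else p.2.count c) := by
          simp [List.mem_append, hne]
        omega

theorem cntP_split (d : PySem.Dict Int (List Int)) (order : List Int) (u : Int) (cs : List Int)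
    (c : Int) (hnd : d.keys.Nodup) (hmem : (u, cs) ∈ d.items) (hu : u ∉ order) :
    cntP d order c = cntP d (order ++ [u]) c + cs.count c := by
  have hnd' : (d.items.map Prod.fst).Nodup := by
    simpa [PySem.Dict.keys] using hnd
  exact cnt_split_list order u cs c hu d.items hnd' hmem

theorem cntP_not_key (d : PySem.Dict Int (List Int)) (order : List Int) (u c : Int)
    (hu : u ∉ d.keys) :
    cntP d (order ++ [u]) c = cntP d order c := by
  unfold cntP
  congr 1
  apply List.map_congr_left
  intro p hp
  have hne : p.1 ≠ u := by
    intro he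
    exact hu (he ▸ PySem.Dict.mem_keys_of_mem_items d hp)
  simp [List.mem_append, hne]

theorem kstep_fold (N : List Int) (f : Int → Nat) :
    ∀ (cs : List Int) (dg : PySem.Dict Int Int) (qq : List Int),
    (∀ c ∈ N, dg.getD c 0 = (f c : Int) + cs.count c) →
    (∀ c ∈ cs, c ∈ N) →
    (∀ c ∈ N, (cs.foldl kstep (dg, qq)).1.getD c 0 = (f c : Int)) ∧
      ∃ add : List Int, (cs.foldl kstep (dg, qq)).2 = qq ++ add ∧ add.Nodup ∧
        ∀ c, c ∈ add ↔ c ∈ cs ∧ f c = 0 := by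
  intro cs
  induction cs with
  | nil =>
      intro dg qq h hcs
      refine ⟨fun c hc => by simpa using h c hc, [], by simp, List.nodup_nil, by simp⟩
  | cons v cs' ih =>
      intro dg qq h hcs
      have hvN : v ∈ N := hcs v List.mem_cons_self
      have hdv : dg.getD v 0 = (f v : Int) + 1 + cs'.count v := by
        have := h v hvN
        rw [List.count_cons_self] at this
        push_cast at this ⊢
        linarith
      have hindv : (dg.insert v (dg.getD v 0 - 1)).getD v 0 = (f v : Int) + cs'.count v := by
        rw [PySem.Dict.getD_insert_self, hdv]; ring
      have hind : ∀ c ∈ N, (dg.insert v (dg.getD v 0 - 1)).getD c 0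
          = (f c : Int) + cs'.count c := by
        intro c hc
        by_cases hcv : c = v
        · subst hcv; exact hindv
        · rw [PySem.Dict.getD_insert]
          simp only [hcv, if_false]
          have := h c hc
          rwa [show (v :: cs').count c = cs'.count c by
            simp [List.count_cons, show ¬v = c from fun h => hcv h.symm]] at this
      have hcs' : ∀ c ∈ cs', c ∈ N := fun c hc => hcs c (List.mem_cons_of_mem _ hc)
      simp only [List.foldl_cons, kstep]
      by_cases h0 : (dg.insert v (dg.getD v 0 - 1)).getD v 0 == 0
      · simp only [h0, if_true]
        have h0' : (f v : Int) + cs'.count v = 0 := by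
          rw [← hindv]; exact_mod_cast beq_iff_eq.mp h0
        have hfv : f v = 0 ∧ cs'.count v = 0 := by
          constructor <;> omega
        obtain ⟨h1, add, hq, hand, hmemadd⟩ := ih _ (qq ++ [v]) hind hcs'
        refine ⟨h1, v :: add, by rw [hq]; simp, ?_, ?_⟩
        · refine List.nodup_cons.mpr ⟨?_, hand⟩
          intro hv
          have := (hmemadd v).mp hv
          exact (List.count_eq_zero.mp hfv.2) this.1
        · intro c
          rw [List.mem_cons, hmemadd c, List.mem_cons]
          constructor
          · rintro (rfl | ⟨h2, h3⟩)
            · exact ⟨Or.inl rfl, hfv.1⟩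
            · exact ⟨Or.inr h2, h3⟩
          · rintro ⟨rfl | h2, h3⟩
            · exact Or.inl rfl
            · exact Or.inr ⟨h2, h3⟩
      · simp only [h0, if_false]
        have h0' : (f v : Int) + cs'.count v ≠ 0 := by
          rw [← hindv]; intro he; exact absurd (beq_iff_eq.mpr he) (by simpa using h0)
        obtain ⟨h1, add, hq, hand, hmemadd⟩ := ih _ qq hind hcs'
        refine ⟨h1, add, hq, hand, ?_⟩
        intro c
        rw [hmemadd c, List.mem_cons]
        constructor
        · rintro ⟨h2, h3⟩; exact ⟨Or.inr h2, h3⟩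
        · rintro ⟨rfl | h2, h3⟩
          · have hcv : cs'.count c ≠ 0 := by
              intro hz
              apply h0'
              rw [h3, hz]; simp
            have : c ∈ cs' := by
              by_contra hnc
              exact hcv (List.count_eq_zero.mpr hnc)
            exact ⟨this, h3⟩
          · exact ⟨h2, h3⟩

theorem goodOrder_append (d : PySem.Dict Int (List Int)) (o : List Int) (u : Int)
    (hg : GoodOrder d o) (hu : ∀ p ∈ d.items, u ∈ p.2 → p.1 ∈ o) :
    GoodOrder d (o ++ [u]) := by
  intro l1 x l2 heq p hp hxp
  rcases List.eq_nil_or_concat l2 with rfl | ⟨l2', b, rfl⟩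
  · have h2 : o ++ [u] = l1 ++ [x] := heq
    obtain ⟨rfl, h4⟩ := List.append_inj' h2 rfl
    have : u = x := by simpa using h4
    subst this
    exact hu p hp hxp
  · have h2 : o ++ [u] = (l1 ++ x :: l2') ++ [b] := by
      rw [heq]; simp
    obtain ⟨rfl, _⟩ := List.append_inj' h2 rfl
    exact hg l1 x l2' rfl p hp hxp

theorem nodup_length_le {l l' : List Int} (h : l.Nodup) (hs : l ⊆ l') :
    l.length ≤ l'.length := by
  calc l.length = l.toFinset.card := (List.toFinset_card_of_nodup h).symm
    _ ≤ l'.toFinset.card := Finset.card_le_card (fun x hx => by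
        simp only [List.mem_toFinset] at *; exact hs hx)
    _ ≤ l'.length := l'.toFinset_card_le

theorem kahn_final (d : PySem.Dict Int (List Int)) (N : List Int)
    (hkeys : ∀ k ∈ d.keys, k ∈ N)
    (rk : Int → Nat)
    (hC1 : ∀ p ∈ d.items, ∀ c ∈ p.2, c ∈ d.keys → rk c < rk p.1)
    (order : List Int)
    (h5 : ∀ u ∈ N, u ∉ order → cntP d order u ≠ 0) :
    ∀ u ∈ N, u ∈ order := by
  by_contra hex
  push_neg at hex
  obtain ⟨u0, hu0N, hu0⟩ := hex
  have step : ∀ x, x ∈ N → x ∉ order → ∃ p ∈ d.items, p.1 ∉ order ∧ x ∈ p.2 := by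
    intro x hxN hxo
    have hne := h5 x hxN hxo
    rw [Ne, cntP_zero_iff] at hne
    push_neg at hne
    obtain ⟨p, hp, hpo, hcnt⟩ := hne
    refine ⟨p, hp, hpo, ?_⟩
    rw [← List.count_pos_iff]
    omega
  obtain ⟨p0, hp0, hp0o, _⟩ := step u0 hu0N hu0
  set T : Finset Int := (d.keys.filter (fun k => decide (k ∉ order))).toFinset with hT
  have hTmem : ∀ k, k ∈ T ↔ k ∈ d.keys ∧ k ∉ order := by
    intro k; simp [hT, List.mem_filter]
  have hTne : T.Nonempty :=
    ⟨p0.1, (hTmem _).mpr ⟨PySem.Dict.mem_keys_of_mem_items d hp0, hp0o⟩⟩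
  obtain ⟨m, hmT, hmax⟩ := T.exists_max_image rk hTne
  obtain ⟨hmk, hmo⟩ := (hTmem m).mp hmT
  obtain ⟨p1, hp1, hp1o, hmem1⟩ := step m (hkeys m hmk) hmo
  have hlt : rk m < rk p1.1 := hC1 p1 hp1 m hmem1 hmk
  have hle : rk p1.1 ≤ rk m :=
    hmax p1.1 ((hTmem _).mpr ⟨PySem.Dict.mem_keys_of_mem_items d hp1, hp1o⟩)
  omega

theorem kahn_spec (d : PySem.Dict Int (List Int)) (N : List Int)
    (hnd : d.keys.Nodup) (hNnd : N.Nodup)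
    (hkeys : ∀ k ∈ d.keys, k ∈ N)
    (hch : ∀ p ∈ d.items, ∀ c ∈ p.2, c ∈ N)
    (rk : Int → Nat)
    (hC1 : ∀ p ∈ d.items, ∀ c ∈ p.2, c ∈ d.keys → rk c < rk p.1) :
    ∀ (fuel : Nat) (q : List Int) (indeg : PySem.Dict Int Int) (order : List Int),
    (order ++ q).Nodup →
    (∀ u ∈ order ++ q, u ∈ N) →
    (∀ c ∈ N, indeg.getD c 0 = (cntP d order c : Int)) →
    (∀ u ∈ order ++ q, cntP d order u = 0) →
    (∀ u ∈ N, u ∉ order ++ q → cntP d order u ≠ 0) →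
    GoodOrder d order →
    N.length ≤ fuel + order.length →
    GoodOrder d (kahnLoop d fuel q indeg order) ∧
      (∀ u ∈ N, u ∈ kahnLoop d fuel q indeg order) ∧
      (∀ u ∈ kahnLoop d fuel q indeg order, u ∈ N) ∧
      (kahnLoop d fuel q indeg order).Nodup := by
  intro fuel
  induction fuel with
  | zero =>
      intro q indeg order h1 h2 h3 h4 h5 h6 hlen
      cases q with
      | nil =>
          have horder : kahnLoop d 0 [] indeg order = order := rfl
          rw [horder]
          refine ⟨h6, ?_, fun u hu => h2 u (by simpa using hu), by simpa using h1⟩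
          exact kahn_final d N hkeys rk hC1 order (fun u hu ho => h5 u hu (by simpa using ho))
      | cons u t =>
          exfalso
          have hsub := nodup_length_le h1 (fun x hx => h2 x hx)
          simp [List.length_append] at hsub
          omega
  | succ n ih =>
      intro q indeg order h1 h2 h3 h4 h5 h6 hlen
      cases q with
      | nil =>
          have horder : kahnLoop d (n+1) [] indeg order = order := rfl
          rw [horder]
          refine ⟨h6, ?_, fun u hu => h2 u (by simpa using hu), by simpa using h1⟩
          exact kahn_final d N hkeys rk hC1 order (fun u hu ho => h5 u hu (by simpa using ho))
      | cons u t =>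
          have hu_mem : u ∈ order ++ u :: t := by simp
          have huN : u ∈ N := h2 u hu_mem
          have hu_not_order : u ∉ order := by
            intro h
            have hd := (List.nodup_append.mp h1).2.2
            exact hd u h u List.mem_cons_self rfl
          have hstep : kahnLoop d (n+1) (u :: t) indeg order =
              kahnLoop d n ((d.getD u []).foldl kstep (indeg, t)).2
                ((d.getD u []).foldl kstep (indeg, t)).1 (order ++ [u]) := rfl
          rw [hstep]
          have hpar : ∀ p ∈ d.items, u ∈ p.2 → p.1 ∈ order := by
            intro p hp hup
            have h4u : cntP d order u = 0 := h4 u hu_mem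
            rw [cntP_zero_iff] at h4u
            by_contra hpo
            exact (List.count_eq_zero.mp (h4u p hp hpo)) hup
          have h6' : GoodOrder d (order ++ [u]) := goodOrder_append d order u h6 hpar
          have hlen' : N.length ≤ n + (order ++ [u]).length := by
            simp only [List.length_append, List.length_cons, List.length_nil]
            omega
          cases hg : d.get? u with
          | none =>
              have hk : u ∉ d.keys := by
                rw [PySem.Dict.get?_eq_none_iff_not_mem_keys] at hg
                exact hg
              have hgetD : d.getD u [] = [] := by
                rw [PySem.Dict.getD_eq_get?_getD, hg]; rfl
              rw [hgetD]
              simp only [List.foldl_nil]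
              have hre : (order ++ [u]) ++ t = order ++ u :: t := by simp
              have hcnt : ∀ c, cntP d (order ++ [u]) c = cntP d order c :=
                fun c => cntP_not_key d order u c hk
              refine ih t indeg (order ++ [u]) ?_ ?_ ?_ ?_ ?_ h6' hlen'
              · rw [hre]; exact h1
              · intro x hx; rw [hre] at hx; exact h2 x hx
              · intro c hc; rw [hcnt c]; exact h3 c hc
              · intro x hx; rw [hre] at hx; rw [hcnt x]; exact h4 x hx
              · intro x hxN hx; rw [hre] at hx; rw [hcnt x]; exact h5 x hxN hx
          | some cs =>
              have hitem : (u, cs) ∈ d.items := PySem.Dict.mem_items_of_get?_eq_some d hg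
              have hgetD : d.getD u [] = cs := by
                rw [PySem.Dict.getD_eq_get?_getD, hg]; rfl
              rw [hgetD]
              have hsplit : ∀ c, cntP d order c = cntP d (order ++ [u]) c + cs.count c :=
                fun c => cntP_split d order u cs c hnd hitem hu_not_order
              have hdg : ∀ c ∈ N,
                  indeg.getD c 0 = ((cntP d (order ++ [u]) c : Nat) : Int) + cs.count c := by
                intro c hc
                rw [h3 c hc, hsplit c]
                push_cast
                ring
              obtain ⟨hind', add, hq', haddnd, haddmem⟩ :=
                kstep_fold N (fun c => cntP d (order ++ [u]) c) cs indeg t hdg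
                  (fun c hc => hch _ hitem c hc)
              rw [hq']
              have haddfresh : ∀ a ∈ add, a ∉ order ++ u :: t := by
                intro a ha hmem
                obtain ⟨hacs, hacnt⟩ := (haddmem a).mp ha
                have h4a := h4 a hmem
                rw [hsplit a] at h4a
                have : cs.count a ≠ 0 := fun hz => (List.count_eq_zero.mp hz) hacs
                omega
              have hmem_iff : ∀ x, x ∈ (order ++ [u]) ++ (t ++ add) ↔
                  x ∈ order ++ u :: t ∨ x ∈ add := by
                intro x
                simp [List.mem_append, List.mem_cons]
                tauto
              refine ih (t ++ add) _ (order ++ [u]) ?_ ?_ hind' ?_ ?_ h6' hlen'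
              · have : (order ++ [u]) ++ (t ++ add) = (order ++ u :: t) ++ add := by simp
                rw [this, List.nodup_append]
                refine ⟨h1, haddnd, ?_⟩
                intro a ha b hb heq
                exact haddfresh b hb (heq ▸ ha)
              · intro x hx
                rcases (hmem_iff x).mp hx with h | h
                · exact h2 x h
                · exact hch _ hitem x ((haddmem x).mp h).1
              · intro x hx
                rcases (hmem_iff x).mp hx with h | h
                · have := h4 x h
                  rw [hsplit x] at this
                  omega
                · exact ((haddmem x).mp h).2
              · intro x hxN hx
                rw [hmem_iff x] at hx
                push_neg at hx
                intro hz
                apply h5 x hxN hx.1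
                rw [hsplit x, hz]
                have : cs.count x = 0 := by
                  rw [List.count_eq_zero]
                  intro hxcs
                  exact hx.2 ((haddmem x).mpr ⟨hxcs, hz⟩)
                omega

theorem getD_foldl_zero (l : List Int) (c : Int) :
    ∀ dd : PySem.Dict Int Int,
    (l.foldl (fun d u => d.insert u (0 : Int)) dd).getD c 0 = if c ∈ l then 0 else dd.getD c 0 := by
  induction l with
  | nil => simp
  | cons a t ih =>
      intro dd
      simp only [List.foldl_cons, ih, List.mem_cons]
      by_cases h : c ∈ t
      · simp [h]
      · by_cases h2 : c = a <;>
          simp [h, h2, PySem.Dict.getD_insert]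

theorem getD_double_fold (c : Int) :
    ∀ (l : List (Int × List Int)) (dd : PySem.Dict Int Int),
    (l.foldl (fun d p => p.2.foldl (fun d c => d.insert c (d.getD c 0 + 1)) d) dd).getD c 0 =
      dd.getD c 0 + (l.map (fun p => (p.2.count c : Int))).sum := by
  intro l
  induction l with
  | nil => simp
  | cons p t ih =>
      intro dd
      simp only [List.foldl_cons, ih, List.map_cons, List.sum_cons,
        PySem.Dict.getD_foldl_insert_add_one]
      ring

theorem bstepA_get_self (d : PySem.Dict Int (List Int)) (n : Int) (bits : PySem.Dict Int Int)
    (u : Int) :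
    (bstepA d n bits u).get? u = some (if u < n then (1 : Int) <<< u.toNat
      else (d.getD u []).foldl (fun b v => PySem.Int.bor b (bits.getD v 0)) 0) := by
  unfold bstepA
  by_cases hun : u < n <;> simp [hun, PySem.Dict.get?_insert_self]

theorem bstepA_get_ne (d : PySem.Dict Int (List Int)) (n : Int) (bits : PySem.Dict Int Int)
    (u x : Int) (h : x ≠ u) :
    (bstepA d n bits u).get? x = bits.get? x := by
  unfold bstepA
  by_cases hun : u < n <;>
    · simp only [hun, if_true, if_false]
      rw [PySem.Dict.get?_insert]
      simp [h]

-- A's reversed Kahn order stores, at every node, the fixpoint value valB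
theorem Abits_fold (d : PySem.Dict Int (List Int)) (n : Int)
    (hacy : ∀ p ∈ d.items, p.1 ∉ rchF d p.1) :
    ∀ (ρ : List Int), ρ.Nodup →
    (∀ l1 u l2, ρ = l1 ++ u :: l2 → ∀ c ∈ d.getD u [], c ∈ l1) →
    ∀ x ∈ ρ, (ρ.foldl (bstepA d n) PySem.Dict.empty).get? x = some (valB d n x) := by
  intro ρ
  induction ρ using List.reverseRecOn with
  | nil => intro _ _ x hx; simp at hx
  | append_singleton ρ' u ih =>
      intro hnd2 hgr x hx
      rw [List.foldl_append, List.foldl_cons, List.foldl_nil]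
      have hnd' : ρ'.Nodup := (List.nodup_append.mp hnd2).1
      have hunm : u ∉ ρ' := by
        intro h
        exact (List.nodup_append.mp hnd2).2.2 u h u List.mem_cons_self rfl
      have hgr' : ∀ l1 w l2, ρ' = l1 ++ w :: l2 → ∀ c ∈ d.getD w [], c ∈ l1 := by
        intro l1 w l2 he c hc
        exact hgr l1 w (l2 ++ [u]) (by rw [he]; simp) c hc
      rcases List.mem_append.mp hx with hx' | hx'
      · have hxu : x ≠ u := fun he => hunm (he ▸ hx')
        rw [bstepA_get_ne d n _ u x hxu]
        exact ih hnd' hgr' x hx'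
      · have hxu : x = u := by simpa using hx'
        subst hxu
        have hchx : ∀ c ∈ d.getD x [], c ∈ ρ' := fun c hc => hgr ρ' x [] rfl c hc
        rw [bstepA_get_self]
        congr 1
        by_cases hxn : x < n
        · rw [if_pos hxn, valB_leaf d n x hxn]
        · rw [if_neg hxn]
          have hvals : (d.getD x []).foldl
              (fun b v => PySem.Int.bor b ((ρ'.foldl (bstepA d n) PySem.Dict.empty).getD v 0)) 0
              = (d.getD x []).foldl (fun b c => PySem.Int.bor b (valB d n c)) 0 := by
            apply PySem.List.foldl_congr_mem
            intro acc c hc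
            congr 1
            rw [PySem.Dict.getD_eq_get?_getD, ih hnd' hgr' c (hchx c hc)]
            rfl
          rw [hvals, ← valB_fix d n hacy x hxn]

theorem goodRev (d : PySem.Dict Int (List Int)) (o : List Int)
    (hnodup : o.Nodup) (hgood : GoodOrder d o)
    (hcompl : ∀ p ∈ d.items, ∀ c ∈ p.2, c ∈ o) :
    ∀ l1 u l2, o.reverse = l1 ++ u :: l2 → ∀ c ∈ d.getD u [], c ∈ l1 := by
  intro l1 u l2 he c hc
  have ho : o = l2.reverse ++ u :: l1.reverse := by
    have := congrArg List.reverse he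
    simpa [List.reverse_append] using this
  cases hgu : d.get? u with
  | none =>
      rw [PySem.Dict.getD_eq_get?_getD, hgu] at hc
      simp at hc
  | some cs =>
      have hitem : (u, cs) ∈ d.items := PySem.Dict.mem_items_of_get?_eq_some d hgu
      have hc' : c ∈ cs := by rwa [PySem.Dict.getD_eq_get?_getD, hgu] at hc
      have hco : c ∈ o := hcompl _ hitem c hc'
      have hunl2 : u ∉ l2.reverse := by
        intro hmem
        rw [ho] at hnodup
        exact (List.nodup_append.mp hnodup).2.2 u hmem u List.mem_cons_self rfl
      rw [ho] at hco
      rcases List.mem_append.mp hco with hcl2 | hcr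
      · obtain ⟨x1, x2, hx⟩ := List.append_of_mem hcl2
        have ho2 : o = x1 ++ c :: (x2 ++ u :: l1.reverse) := by
          rw [ho, hx]; simp
        have := hgood x1 c (x2 ++ u :: l1.reverse) ho2 (u, cs) hitem hc'
        exact absurd (hx ▸ List.mem_append_left (c :: x2) this) hunl2
      · rcases List.mem_cons.mp hcr with rfl | hcl1
        · exact absurd (hgood _ _ _ ho _ hitem hc') hunl2
        · exact List.mem_reverse.mp hcl1

-- ===== VERDICT (by name: the statement is the Claim_ definition above) =====
theorem cluster_info_py_spec : Claim_equal_cluster_info_py := by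
  intro adjacency n_leaves _hdom hpre
  unfold Spec_cluster_info_py
  obtain ⟨hacy, _hpre2⟩ := hpre
  set d := PySem.Dict.ofList adjacency with hd
  have hnd : d.keys.Nodup := PySem.Dict.nodup_keys_ofList adjacency
  have hC1 : ∀ p ∈ d.items, ∀ c ∈ p.2, c ∈ d.keys → rkF d c < rkF d p.1 := by
    intro p hp c hc hck
    have hget : d.getD p.1 [] = p.2 := by
      rcases p with ⟨k, v⟩
      exact PySem.Dict.getD_of_mem_items d hp hnd []
    exact rk_lt d hacy (hget ▸ hc) hck
  set N : PySem.Set Int :=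
    PySem.Set.union (PySem.Set.union (PySem.Set.ofList d.keys) d.values.flatten)
      (PySem.List.pyRange 0 n_leaves 1) with hN
  have hNnd : N.Nodup :=
    PySem.Set.nodup_union _ _ (PySem.Set.nodup_union _ _ (PySem.Set.nodup_ofList _))
  have hkeysN : ∀ k ∈ d.keys, k ∈ N := by
    intro k hk
    rw [hN]
    exact (PySem.Set.mem_union _ _ _).mpr (Or.inl ((PySem.Set.mem_union _ _ _).mpr
      (Or.inl ((PySem.Set.mem_ofList _ _).mpr hk))))
  have hchN : ∀ p ∈ d.items, ∀ c ∈ p.2, c ∈ N := by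
    intro p hp c hc
    rw [hN]
    refine (PySem.Set.mem_union _ _ _).mpr (Or.inl ((PySem.Set.mem_union _ _ _).mpr
      (Or.inr ?_)))
    exact List.mem_flatten.mpr ⟨p.2, List.mem_map_of_mem hp, hc⟩
  set indeg1 := d.items.foldl
      (fun dd p => p.2.foldl (fun dd c => dd.insert c (dd.getD c 0 + 1)) dd)
      (N.foldl (fun dd u => dd.insert u (0 : Int)) PySem.Dict.empty) with hindeg
  have h3init : ∀ c ∈ N, indeg1.getD c 0 = (cntP d [] c : Int) := by
    intro c hc
    rw [hindeg, getD_double_fold, getD_foldl_zero, cntP_nil]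
    simp [hc, Nat.cast_list_sum, List.map_map, Function.comp_def]
  set q0 := N.filter (fun u => indeg1.getD u 0 == 0) with hq0
  have hq0mem : ∀ u, u ∈ q0 ↔ u ∈ N ∧ cntP d [] u = 0 := by
    intro u
    rw [hq0, List.mem_filter]
    constructor
    · rintro ⟨h1, h2⟩
      refine ⟨h1, ?_⟩
      rw [h3init u h1] at h2
      exact_mod_cast beq_iff_eq.mp h2
    · rintro ⟨h1, h2⟩
      refine ⟨h1, ?_⟩
      rw [h3init u h1, h2]
      simp
  obtain ⟨hgood, hcompl, hsubN, hond⟩ := kahn_spec d N hnd hNnd hkeysN hchN (rkF d) hC1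
    (N.length + (d.values.map (·.length)).sum) q0 indeg1 []
    (by simpa using hNnd.filter _)
    (fun u hu => ((hq0mem u).mp (by simpa using hu)).1)
    (fun c hc => h3init c hc)
    (fun u hu => ((hq0mem u).mp (by simpa using hu)).2)
    (fun u huN hu hz => hu (by simpa using (hq0mem u).mpr ⟨huN, hz⟩))
    (by intro l1 x l2 he p hp hxp; exfalso; cases l1 <;> simp at he)
    (by simp)
  set o := kahnLoop d (N.length + (d.values.map (·.length)).sum) q0 indeg1 [] with ho
  have hgrev := goodRev d o hond hgood
    (fun p hp c hc => hcompl c (hchN p hp c hc))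
  have habits := Abits_fold d n_leaves hacy o.reverse
    (List.nodup_reverse.mpr hond) hgrev
  have hbitsA_eq : leafsetsBits d n_leaves
      = o.reverse.foldl (bstepA d n_leaves) PySem.Dict.empty := rfl
  have hval : ∀ x ∈ N, (leafsetsBits d n_leaves).getD x 0 = valB d n_leaves x := by
    intro x hx
    rw [hbitsA_eq, PySem.Dict.getD_eq_get?_getD,
      habits x (List.mem_reverse.mpr (hcompl x hx))]
    rfl
  have hA : cluster_info_py adjacency n_leaves = d.items.foldl (stepPure d n_leaves) [] := by
    simp only [cluster_info_py]
    rw [← hd]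
    apply PySem.List.foldl_congr_mem
    intro acc p hp
    by_cases hpnil : p.2 = []
    · rw [if_pos hpnil]; rw [stepPure, if_pos hpnil]
    · rw [if_neg hpnil]; rw [stepPure, if_neg hpnil]
      have h1 := hval p.1 (hkeysN _ (PySem.Dict.mem_keys_of_mem_items d hp))
      have hcb : p.2.map (fun c => (leafsetsBits d n_leaves).getD c 0)
          = p.2.map (valB d n_leaves) :=
        List.map_congr_left (fun c hc => hval c (hchN p hp c hc))
      rw [h1, hcb]
  have hB : cluster_info_py_alt adjacency n_leaves = d.items.foldl (stepPure d n_leaves) [] := by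
    simp only [cluster_info_py_alt]
    rw [← hd]
    exact alt_fold d n_leaves hacy d.items [] PySem.Dict.empty (GoodM_empty d n_leaves)
  rw [hA, hB]
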